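-- pv_equiv track=rewrite | github.com/hiunshim/olympiad | code_jam/code_jam_qualification_round_2022/3d_printing.py | solve
-- ===== SOURCE A (Python) =====
-- def solve(printer_1, printer_2, printer_3):
--     colors = [min(printer_1[i], printer_2[i], printer_3[i]) for i in range(4)]
--     if sum(colors) < 10 ** 6:
--         return "IMPOSSIBLE"
--     remainder = sum(colors) - (10 ** 6)
--     for i in range(4):
--         if remainder == 0:
--             return " ".join(map(str, colors))
--         remainder -= colors[i]
--         colors[i] = 0
--         if remainder < 0:
--             colors[i] -= remainder
--             remainder = 0
--     return "IMPOSSIBLE"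
-- ===== SOURCE B (Python) =====
-- def solve(printer_1, printer_2, printer_3):
--     colors = [min(printer_1[i], printer_2[i], printer_3[i]) for i in range(4)]
--     excess = sum(colors) - 10 ** 6
--     if excess < 0:
--         return "IMPOSSIBLE"
--     prefix = [0]
--     for c in colors:
--         prefix.append(prefix[-1] + c)
--     for i in range(4):
--         if prefix[i] == excess:
--             return " ".join(map(str, [0] * i + colors[i:]))
--         if prefix[i + 1] > excess:
--             return " ".join(map(str, [0] * i + [prefix[i + 1] - excess] + colors[i + 1:]))
--     return "IMPOSSIBLE"
-- ===== Notes on version B (the rewrite author's own statement) =====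
-- stated objective: alternative
-- what changed: B replaces A's destructive loop (mutating colors and a running remainder with early returns and a negative-remainder restore) by a functional two-phase computation: build a prefix-sum table, locate the first index where the excess is exhausted, and construct the output by slicing ([0]*i + pivot + untouched tail).
-- intended difference: On inputs where the running excess stays strictly positive through the first three colors (all three proper prefix sums of the per-index minima are below sum-10**6), A returns "IMPOSSIBLE" because its remainder==0 early-return cannot run after the final loop iteration; B returns the valid allocation "0 0 0 1000000", which is the intended answer. — e.g. on solve([0, 0, 0, 1000001], [0, 0, 0, 1000002], [0, 0, 0, 1000001]): A returns "IMPOSSIBLE", B returns "0 0 0 1000000"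
import Mathlib
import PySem

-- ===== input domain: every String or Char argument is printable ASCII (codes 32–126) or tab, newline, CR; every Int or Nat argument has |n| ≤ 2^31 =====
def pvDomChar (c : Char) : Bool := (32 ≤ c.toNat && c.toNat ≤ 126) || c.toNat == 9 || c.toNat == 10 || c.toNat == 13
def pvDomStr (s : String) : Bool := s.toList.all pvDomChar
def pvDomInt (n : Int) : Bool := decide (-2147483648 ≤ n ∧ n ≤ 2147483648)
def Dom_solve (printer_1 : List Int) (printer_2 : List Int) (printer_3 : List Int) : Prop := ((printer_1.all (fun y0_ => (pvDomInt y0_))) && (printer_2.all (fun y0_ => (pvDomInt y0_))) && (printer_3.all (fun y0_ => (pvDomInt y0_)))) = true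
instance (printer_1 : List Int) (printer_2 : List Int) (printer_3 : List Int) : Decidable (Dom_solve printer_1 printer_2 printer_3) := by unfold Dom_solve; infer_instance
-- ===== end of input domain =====

-- B replaces A's destructive loop (mutating colors and a running remainder, with early returns and
-- a negative-remainder restore) by a functional two-phase computation: a prefix-sum table, a search
-- for the first index where the excess is exhausted, and output built by slicing (objective: alternative).

-- ===== PORT A =====
-- colors = [min(printer_1[i], printer_2[i], printer_3[i]) for i in range(4)]; none = IndexError
def pvColors? (printer_1 : List Int) (printer_2 : List Int) (printer_3 : List Int) : Option (List Int) :=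
  (PySem.List.pyRange 0 4 1).mapM (fun i => do
    let a ← PySem.List.pyGet? printer_1 i
    let b ← PySem.List.pyGet? printer_2 i
    let c ← PySem.List.pyGet? printer_3 i
    pure (min a (min b c)))

-- A's 'for i in range(4)' loop with its early returns
def pvLoopA : List Int → List Int → Int → String
  | [], _, _ => "IMPOSSIBLE"
  | i :: rest, colors, remainder =>
    if remainder = 0 then PySem.Str.join " " (colors.map PySem.Int.toStr)
    else
      let remainder1 := remainder - PySem.List.pyGetD colors i 0
      let colors1 := PySem.List.pySetD colors i 0
      if remainder1 < 0 then
        pvLoopA rest (PySem.List.pySetD colors1 i (PySem.List.pyGetD colors1 i 0 - remainder1)) 0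
      else
        pvLoopA rest colors1 remainder1

def solve (printer_1 : List Int) (printer_2 : List Int) (printer_3 : List Int) : String :=
  match pvColors? printer_1 printer_2 printer_3 with
  | none => ""   -- IndexError (some list shorter than 4); excluded by Pre_solve
  | some colors =>
    if colors.sum < 10 ^ 6 then "IMPOSSIBLE"
    else pvLoopA (PySem.List.pyRange 0 4 1) colors (colors.sum - 10 ^ 6)

-- ===== PORT B =====
-- B's prefix-table loop: 'prefix = [0]; for c in colors: prefix.append(prefix[-1] + c)'
def pvPrefix (colors : List Int) : List Int :=
  colors.foldl (fun pr c => pr ++ [PySem.List.pyGetD pr (-1) 0 + c]) [0]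

-- B's 'for i in range(4)' pivot search with its two returns
def pvSearch : List Int → List Int → List Int → Int → String
  | [], _, _, _ => "IMPOSSIBLE"
  | i :: rest, prefixL, colors, excess =>
    if PySem.List.pyGetD prefixL i 0 = excess then
      PySem.Str.join " " ((PySem.List.pyRepeat [0] i ++ PySem.List.slice colors (some i) none).map PySem.Int.toStr)
    else if excess < PySem.List.pyGetD prefixL (i+1) 0 then
      PySem.Str.join " " ((PySem.List.pyRepeat [0] i ++ [PySem.List.pyGetD prefixL (i+1) 0 - excess] ++ PySem.List.slice colors (some (i+1)) none).map PySem.Int.toStr)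
    else pvSearch rest prefixL colors excess

def solve_alt (printer_1 : List Int) (printer_2 : List Int) (printer_3 : List Int) : String :=
  match pvColors? printer_1 printer_2 printer_3 with
  | none => ""   -- IndexError; excluded by Pre_solve
  | some colors =>
    let excess := colors.sum - 10 ^ 6
    if excess < 0 then "IMPOSSIBLE"
    else pvSearch (PySem.List.pyRange 0 4 1) (pvPrefix colors) colors excess

-- ===== PRECONDITION & SPEC =====
-- Pre_ excludes only lists with fewer than 4 elements, on which A raises IndexError.
def Pre_solve (printer_1 : List Int) (printer_2 : List Int) (printer_3 : List Int) : Prop :=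
  4 ≤ printer_1.length ∧ 4 ≤ printer_2.length ∧ 4 ≤ printer_3.length
instance (printer_1 : List Int) (printer_2 : List Int) (printer_3 : List Int) : Decidable (Pre_solve printer_1 printer_2 printer_3) := by unfold Pre_solve; infer_instance

def pvWitness_solve : List Int × List Int × List Int := ([1, 2, 3, 4], [4, 3, 2, 1], [2, 2, 2, 2])

-- On inputs where the running excess stays strictly positive through the first three colors (all
-- three proper prefix sums of the per-index minima are below sum−10^6), A returns "IMPOSSIBLE"
-- because its remainder==0 early-return cannot run after the final loop iteration; B returns the
-- valid allocation "0 0 0 1000000", which is the intended answer.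
def D_solve (printer_1 : List Int) (printer_2 : List Int) (printer_3 : List Int) : Prop :=
  let m := fun (i : Nat) => min (printer_1.getD i 0) (min (printer_2.getD i 0) (printer_3.getD i 0))
  let r := m 0 + m 1 + m 2 + m 3 - 10 ^ 6
  0 < r ∧ m 0 < r ∧ m 0 + m 1 < r ∧ m 0 + m 1 + m 2 < r
instance (printer_1 : List Int) (printer_2 : List Int) (printer_3 : List Int) : Decidable (D_solve printer_1 printer_2 printer_3) := by unfold D_solve; infer_instance

def Spec_solve (printer_1 : List Int) (printer_2 : List Int) (printer_3 : List Int) (out : String) : Prop := ¬ D_solve printer_1 printer_2 printer_3 → out = solve_alt printer_1 printer_2 printer_3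
instance (printer_1 : List Int) (printer_2 : List Int) (printer_3 : List Int) (out : String) : Decidable (Spec_solve printer_1 printer_2 printer_3 out) := by unfold Spec_solve; infer_instance

def pvDiffWitness_solve : List Int × List Int × List Int := ([0, 0, 0, 1000001], [0, 0, 0, 1000002], [0, 0, 0, 1000001])
def pvDiffWitnessOut_solve : String × String := ("IMPOSSIBLE", "0 0 0 1000000")

-- ===== CLAIM (what is proved, stated in full; the proofs are below) =====
def Claim_unchanged_solve : Prop := ∀ (printer_1 : List Int) (printer_2 : List Int) (printer_3 : List Int), Dom_solve printer_1 printer_2 printer_3 → Pre_solve printer_1 printer_2 printer_3 → Spec_solve printer_1 printer_2 printer_3 (solve printer_1 printer_2 printer_3)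
def Claim_changed_solve : Prop := Dom_solve (pvDiffWitness_solve.1) (pvDiffWitness_solve.2.1) (pvDiffWitness_solve.2.2) ∧ Pre_solve (pvDiffWitness_solve.1) (pvDiffWitness_solve.2.1) (pvDiffWitness_solve.2.2) ∧ D_solve (pvDiffWitness_solve.1) (pvDiffWitness_solve.2.1) (pvDiffWitness_solve.2.2) ∧ solve (pvDiffWitness_solve.1) (pvDiffWitness_solve.2.1) (pvDiffWitness_solve.2.2) = pvDiffWitnessOut_solve.1 ∧ solve_alt (pvDiffWitness_solve.1) (pvDiffWitness_solve.2.1) (pvDiffWitness_solve.2.2) = pvDiffWitnessOut_solve.2 ∧ pvDiffWitnessOut_solve.1 ≠ pvDiffWitnessOut_solve.2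
def Claim_exact_solve : Prop := ∀ (printer_1 : List Int) (printer_2 : List Int) (printer_3 : List Int), Dom_solve printer_1 printer_2 printer_3 → Pre_solve printer_1 printer_2 printer_3 → D_solve printer_1 printer_2 printer_3 → solve printer_1 printer_2 printer_3 ≠ solve_alt printer_1 printer_2 printer_3

-- ===== LEMMAS AND PROOFS =====

theorem pvGet4 (x0 x1 x2 x3 : Int) (r : List Int) :
    PySem.List.pyGet? (x0::x1::x2::x3::r) 0 = some x0 ∧
    PySem.List.pyGet? (x0::x1::x2::x3::r) 1 = some x1 ∧
    PySem.List.pyGet? (x0::x1::x2::x3::r) 2 = some x2 ∧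
    PySem.List.pyGet? (x0::x1::x2::x3::r) 3 = some x3 := by
  refine ⟨PySem.List.pyGet?_zero_cons _ _, ?_, ?_, ?_⟩
  · have := PySem.List.pyGet?_ofNat (x0::x1::x2::x3::r) 1 (by simp); simpa using this
  · have := PySem.List.pyGet?_ofNat (x0::x1::x2::x3::r) 2 (by simp); simpa using this
  · have := PySem.List.pyGet?_ofNat (x0::x1::x2::x3::r) 3 (by simp); simpa using this

theorem pvColors?_eq (a0 a1 a2 a3 b0 b1 b2 b3 c0 c1 c2 c3 : Int) (r1 r2 r3 : List Int) :
    pvColors? (a0::a1::a2::a3::r1) (b0::b1::b2::b3::r2) (c0::c1::c2::c3::r3) =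
    some [min a0 (min b0 c0), min a1 (min b1 c1), min a2 (min b2 c2), min a3 (min b3 c3)] := by
  have hr : PySem.List.pyRange 0 4 1 = [0,1,2,3] := by decide
  obtain ⟨ha0, ha1, ha2, ha3⟩ := pvGet4 a0 a1 a2 a3 r1
  obtain ⟨hb0, hb1, hb2, hb3⟩ := pvGet4 b0 b1 b2 b3 r2
  obtain ⟨hc0, hc1, hc2, hc3⟩ := pvGet4 c0 c1 c2 c3 r3
  simp [pvColors?, hr, List.mapM_cons, ha0, ha1, ha2, ha3, hb0, hb1, hb2, hb3, hc0, hc1, hc2, hc3]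

theorem pvGd (x0 x1 x2 x3 d : Int) :
    PySem.List.pyGetD [x0,x1,x2,x3] 0 d = x0 ∧
    PySem.List.pyGetD [x0,x1,x2,x3] 1 d = x1 ∧
    PySem.List.pyGetD [x0,x1,x2,x3] 2 d = x2 ∧
    PySem.List.pyGetD [x0,x1,x2,x3] 3 d = x3 := by
  refine ⟨?_, ?_, ?_, ?_⟩ <;>
    simp [PySem.List.pyGetD, PySem.List.pyGet?, PySem.List.pyIdx?]

theorem pvSd (x0 x1 x2 x3 v : Int) :
    PySem.List.pySetD [x0,x1,x2,x3] 0 v = [v,x1,x2,x3] ∧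
    PySem.List.pySetD [x0,x1,x2,x3] 1 v = [x0,v,x2,x3] ∧
    PySem.List.pySetD [x0,x1,x2,x3] 2 v = [x0,x1,v,x3] ∧
    PySem.List.pySetD [x0,x1,x2,x3] 3 v = [x0,x1,x2,v] := by
  refine ⟨?_, ?_, ?_, ?_⟩ <;>
    simp [PySem.List.pySetD, PySem.List.pySet?, PySem.List.pyIdx?, List.set]

theorem pvLoopA_cons (i : Int) (rest colors : List Int) (r : Int) :
    pvLoopA (i::rest) colors r =
      if r = 0 then PySem.Str.join " " (colors.map PySem.Int.toStr)
      else if r - PySem.List.pyGetD colors i 0 < 0 then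
        pvLoopA rest (PySem.List.pySetD (PySem.List.pySetD colors i 0) i
          (PySem.List.pyGetD (PySem.List.pySetD colors i 0) i 0 - (r - PySem.List.pyGetD colors i 0))) 0
      else pvLoopA rest (PySem.List.pySetD colors i 0) (r - PySem.List.pyGetD colors i 0) := rfl

theorem pvJoinEq (l1 l2 : List Int) (h : l1 = l2) :
    PySem.Str.join " " (List.map PySem.Int.toStr l1) = PySem.Str.join " " (List.map PySem.Int.toStr l2) := by rw [h]

theorem pvLoopA_eval (m0 m1 m2 m3 r : Int) :
    pvLoopA [0,1,2,3] [m0,m1,m2,m3] r =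
      if 0 = r then PySem.Str.join " " (List.map PySem.Int.toStr [m0,m1,m2,m3])
      else if r < m0 then PySem.Str.join " " (List.map PySem.Int.toStr [m0 - r, m1, m2, m3])
      else if m0 = r then PySem.Str.join " " (List.map PySem.Int.toStr [0, m1, m2, m3])
      else if r < m0 + m1 then PySem.Str.join " " (List.map PySem.Int.toStr [0, m0 + m1 - r, m2, m3])
      else if m0 + m1 = r then PySem.Str.join " " (List.map PySem.Int.toStr [0, 0, m2, m3])
      else if r < m0 + m1 + m2 then PySem.Str.join " " (List.map PySem.Int.toStr [0, 0, m0 + m1 + m2 - r, m3])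
      else if m0 + m1 + m2 = r then PySem.Str.join " " (List.map PySem.Int.toStr [0, 0, 0, m3])
      else "IMPOSSIBLE" := by
  rw [pvLoopA_cons]
  simp only [(pvGd _ _ _ _ _).1, (pvSd _ _ _ _ _).1]
  by_cases e0 : 0 = r
  · rw [if_pos (by omega : r = 0), if_pos e0]
  · rw [if_neg (by omega : ¬ r = 0), if_neg e0]
    by_cases g0 : r < m0
    · rw [if_pos (by omega : r - m0 < 0), if_pos g0]
      rw [pvLoopA_cons, if_pos rfl]
      { refine pvJoinEq _ _ ?_ ; simp only [List.cons.injEq, and_true] ; omega }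
    · rw [if_neg (by omega : ¬ r - m0 < 0), if_neg g0]
      rw [pvLoopA_cons]
      simp only [(pvGd _ _ _ _ _).2.1, (pvSd _ _ _ _ _).2.1]
      by_cases e1 : m0 = r
      · rw [if_pos (by omega : r - m0 = 0), if_pos e1]
      · rw [if_neg (by omega : ¬ r - m0 = 0), if_neg e1]
        by_cases g1 : r < m0 + m1
        · rw [if_pos (by omega : r - m0 - m1 < 0), if_pos g1]
          rw [pvLoopA_cons, if_pos rfl]
          { refine pvJoinEq _ _ ?_ ; simp only [List.cons.injEq, and_true, true_and] ; omega }
        · rw [if_neg (by omega : ¬ r - m0 - m1 < 0), if_neg g1]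
          rw [pvLoopA_cons]
          simp only [(pvGd _ _ _ _ _).2.2.1, (pvSd _ _ _ _ _).2.2.1]
          by_cases e2 : m0 + m1 = r
          · rw [if_pos (by omega : r - m0 - m1 = 0), if_pos e2]
          · rw [if_neg (by omega : ¬ r - m0 - m1 = 0), if_neg e2]
            by_cases g2 : r < m0 + m1 + m2
            · rw [if_pos (by omega : r - m0 - m1 - m2 < 0), if_pos g2]
              rw [pvLoopA_cons, if_pos rfl]
              { refine pvJoinEq _ _ ?_ ; simp only [List.cons.injEq, and_true, true_and] ; omega }
            · rw [if_neg (by omega : ¬ r - m0 - m1 - m2 < 0), if_neg g2]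
              rw [pvLoopA_cons]
              simp only [(pvGd _ _ _ _ _).2.2.2, (pvSd _ _ _ _ _).2.2.2]
              by_cases e3 : m0 + m1 + m2 = r
              · rw [if_pos (by omega : r - m0 - m1 - m2 = 0), if_pos e3]
              · rw [if_neg (by omega : ¬ r - m0 - m1 - m2 = 0), if_neg e3]
                by_cases n3 : r - m0 - m1 - m2 - m3 < 0
                · rw [if_pos n3]; rfl
                · rw [if_neg n3]; rfl

theorem pvPrefix_eval (m0 m1 m2 m3 : Int) :
    pvPrefix [m0,m1,m2,m3] = [0, m0, m0+m1, m0+m1+m2, m0+m1+m2+m3] := by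
  simp [pvPrefix, PySem.List.pyGetD, PySem.List.pyGet?, PySem.List.pyIdx?, add_assoc]

theorem pvSearch_eval (m0 m1 m2 m3 r : Int) :
    pvSearch [0,1,2,3] [0, m0, m0+m1, m0+m1+m2, m0+m1+m2+m3] [m0,m1,m2,m3] r =
      if 0 = r then PySem.Str.join " " (List.map PySem.Int.toStr [m0,m1,m2,m3])
      else if r < m0 then PySem.Str.join " " (List.map PySem.Int.toStr [m0 - r, m1, m2, m3])
      else if m0 = r then PySem.Str.join " " (List.map PySem.Int.toStr [0, m1, m2, m3])
      else if r < m0 + m1 then PySem.Str.join " " (List.map PySem.Int.toStr [0, m0 + m1 - r, m2, m3])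
      else if m0 + m1 = r then PySem.Str.join " " (List.map PySem.Int.toStr [0, 0, m2, m3])
      else if r < m0 + m1 + m2 then PySem.Str.join " " (List.map PySem.Int.toStr [0, 0, m0 + m1 + m2 - r, m3])
      else if m0 + m1 + m2 = r then PySem.Str.join " " (List.map PySem.Int.toStr [0, 0, 0, m3])
      else if r < m0 + m1 + m2 + m3 then PySem.Str.join " " (List.map PySem.Int.toStr [0, 0, 0, m0 + m1 + m2 + m3 - r])
      else "IMPOSSIBLE" := by
  simp [pvSearch, PySem.List.pyGetD, PySem.List.pyGet?, PySem.List.pyIdx?,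
    PySem.List.pyRepeat, PySem.List.slice]

theorem pvDecomp (l : List Int) (h : 4 ≤ l.length) :
    ∃ x0 x1 x2 x3 r, l = x0::x1::x2::x3::r := by
  rcases l with _|⟨x0, _|⟨x1, _|⟨x2, _|⟨x3, r⟩⟩⟩⟩ <;> simp_all

-- ===== VERDICT (by name: the statement is the Claim_ definition above) =====
theorem solve_spec : Claim_unchanged_solve := by
  intro p1 p2 p3 _ hpre hnD
  obtain ⟨L1, L2, L3⟩ := hpre
  obtain ⟨a0, a1, a2, a3, r1, rfl⟩ := pvDecomp p1 L1
  obtain ⟨b0, b1, b2, b3, r2, rfl⟩ := pvDecomp p2 L2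
  obtain ⟨c0, c1, c2, c3, r3, rfl⟩ := pvDecomp p3 L3
  simp only [D_solve,
    (show (a0::a1::a2::a3::r1).getD 0 0 = a0 from rfl), (show (a0::a1::a2::a3::r1).getD 1 0 = a1 from rfl),
    (show (a0::a1::a2::a3::r1).getD 2 0 = a2 from rfl), (show (a0::a1::a2::a3::r1).getD 3 0 = a3 from rfl),
    (show (b0::b1::b2::b3::r2).getD 0 0 = b0 from rfl), (show (b0::b1::b2::b3::r2).getD 1 0 = b1 from rfl),
    (show (b0::b1::b2::b3::r2).getD 2 0 = b2 from rfl), (show (b0::b1::b2::b3::r2).getD 3 0 = b3 from rfl),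
    (show (c0::c1::c2::c3::r3).getD 0 0 = c0 from rfl), (show (c0::c1::c2::c3::r3).getD 1 0 = c1 from rfl),
    (show (c0::c1::c2::c3::r3).getD 2 0 = c2 from rfl), (show (c0::c1::c2::c3::r3).getD 3 0 = c3 from rfl)] at hnD
  set m0 := min a0 (min b0 c0) with hm0
  set m1 := min a1 (min b1 c1) with hm1
  set m2 := min a2 (min b2 c2) with hm2
  set m3 := min a3 (min b3 c3) with hm3
  have hA : PySem.List.pyRange 0 4 1 = [0,1,2,3] := by decide
  have hsum : ([m0, m1, m2, m3] : List Int).sum = m0 + m1 + m2 + m3 := by simp; ring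
  unfold solve solve_alt
  rw [pvColors?_eq, hA]
  simp only [← hm0, ← hm1, ← hm2, ← hm3, hsum]
  by_cases hS : m0 + m1 + m2 + m3 < 10 ^ 6
  · rw [if_pos hS, if_pos (by omega : m0 + m1 + m2 + m3 - 10 ^ 6 < 0)]
  · rw [if_neg hS, if_neg (by omega : ¬ m0 + m1 + m2 + m3 - 10 ^ 6 < 0)]
    rw [pvPrefix_eval, pvLoopA_eval, pvSearch_eval]
    split_ifs with h1 h2 h3 h4 h5 h6 h7 h8 <;> first | (exfalso; omega) | rfl

theorem solve_changed : Claim_changed_solve := by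
  unfold Claim_changed_solve; decide

theorem solve_tight : Claim_exact_solve := by
  intro p1 p2 p3 _ hpre hD
  obtain ⟨L1, L2, L3⟩ := hpre
  obtain ⟨a0, a1, a2, a3, r1, rfl⟩ := pvDecomp p1 L1
  obtain ⟨b0, b1, b2, b3, r2, rfl⟩ := pvDecomp p2 L2
  obtain ⟨c0, c1, c2, c3, r3, rfl⟩ := pvDecomp p3 L3
  simp only [D_solve,
    (show (a0::a1::a2::a3::r1).getD 0 0 = a0 from rfl), (show (a0::a1::a2::a3::r1).getD 1 0 = a1 from rfl),
    (show (a0::a1::a2::a3::r1).getD 2 0 = a2 from rfl), (show (a0::a1::a2::a3::r1).getD 3 0 = a3 from rfl),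
    (show (b0::b1::b2::b3::r2).getD 0 0 = b0 from rfl), (show (b0::b1::b2::b3::r2).getD 1 0 = b1 from rfl),
    (show (b0::b1::b2::b3::r2).getD 2 0 = b2 from rfl), (show (b0::b1::b2::b3::r2).getD 3 0 = b3 from rfl),
    (show (c0::c1::c2::c3::r3).getD 0 0 = c0 from rfl), (show (c0::c1::c2::c3::r3).getD 1 0 = c1 from rfl),
    (show (c0::c1::c2::c3::r3).getD 2 0 = c2 from rfl), (show (c0::c1::c2::c3::r3).getD 3 0 = c3 from rfl)] at hD
  set m0 := min a0 (min b0 c0) with hm0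
  set m1 := min a1 (min b1 c1) with hm1
  set m2 := min a2 (min b2 c2) with hm2
  set m3 := min a3 (min b3 c3) with hm3
  have hA : PySem.List.pyRange 0 4 1 = [0,1,2,3] := by decide
  have hsum : ([m0, m1, m2, m3] : List Int).sum = m0 + m1 + m2 + m3 := by simp; ring
  unfold solve solve_alt
  rw [pvColors?_eq, hA]
  simp only [← hm0, ← hm1, ← hm2, ← hm3, hsum]
  rw [if_neg (by omega : ¬ m0 + m1 + m2 + m3 < 10 ^ 6),
      if_neg (by omega : ¬ m0 + m1 + m2 + m3 - 10 ^ 6 < 0)]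
  rw [pvPrefix_eval, pvLoopA_eval, pvSearch_eval]
  rw [if_neg (by omega), if_neg (by omega), if_neg (by omega), if_neg (by omega),
      if_neg (by omega), if_neg (by omega), if_neg (by omega),
      if_neg (by omega), if_neg (by omega), if_neg (by omega), if_neg (by omega),
      if_neg (by omega), if_neg (by omega), if_neg (by omega),
      if_pos (by omega : m0 + m1 + m2 + m3 - 10 ^ 6 < m0 + m1 + m2 + m3)]
  rw [show ([0, 0, 0, m0 + m1 + m2 + m3 - (m0 + m1 + m2 + m3 - 10 ^ 6)] : List Int) = [0, 0, 0, 10 ^ 6] from by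
    simp only [List.cons.injEq, and_true, true_and]; omega]
  decide
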